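-- pv_equiv track=rewrite | github.com/Adriexpo/TFG | prediction_automatic_image_reading.py | group_bounding_boxes
-- ===== SOURCE A (Python) =====
-- def group_bounding_boxes(boxes, max_gap=25):
--     grouped_boxes = []
--     current_group = []
--
--     for i, box in enumerate(boxes):
--         if not current_group:
--             current_group.append(box)
--             continue
--
--         _, prev_startY, _, prev_endY = current_group[-1]
--         _, startY, _, endY = box
--
--         if abs(startY - prev_endY) <= max_gap:
--             current_group.append(box)
--         else:
--             grouped_boxes.append(current_group)
--             current_group = [box]
--
--     if current_group:
--         grouped_boxes.append(current_group)
--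
--     return grouped_boxes
-- ===== SOURCE B (Python) =====
-- def group_bounding_boxes(boxes, max_gap=25):
--     # Two staged passes: (1) compute the break indices where the adjacent
--     # vertical gap exceeds max_gap, (2) slice the list between successive edges.
--     n = len(boxes)
--     if n == 0:
--         return []
--     edges = [0] + [i for i in range(1, n)
--                    if abs(boxes[i][1] - boxes[i - 1][3]) > max_gap] + [n]
--     return [boxes[a:b] for a, b in zip(edges, edges[1:])]
-- ===== Notes on version B (the rewrite author's own statement) =====
-- stated objective: alternative
-- what changed: B replaces A's single pass with a current-group accumulator by two staged passes: it first computes the list of break indices (where the adjacent vertical gap exceeds max_gap) and then partitions the list by slicing between successive edges.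
import Mathlib
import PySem

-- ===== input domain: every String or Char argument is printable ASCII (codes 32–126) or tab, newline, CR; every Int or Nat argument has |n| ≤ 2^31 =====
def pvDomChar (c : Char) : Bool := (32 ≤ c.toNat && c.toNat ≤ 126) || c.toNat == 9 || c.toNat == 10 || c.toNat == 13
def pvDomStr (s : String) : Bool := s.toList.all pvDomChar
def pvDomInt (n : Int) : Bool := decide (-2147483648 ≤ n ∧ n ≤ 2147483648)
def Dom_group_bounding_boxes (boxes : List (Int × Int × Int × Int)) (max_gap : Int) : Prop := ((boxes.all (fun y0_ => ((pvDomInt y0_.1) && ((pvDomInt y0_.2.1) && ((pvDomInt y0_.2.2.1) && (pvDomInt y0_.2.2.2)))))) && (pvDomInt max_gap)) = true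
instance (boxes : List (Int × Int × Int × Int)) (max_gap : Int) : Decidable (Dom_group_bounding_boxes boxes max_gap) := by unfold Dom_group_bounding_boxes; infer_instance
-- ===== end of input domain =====

-- B groups the boxes in two staged passes (break indices first, then slicing between successive
-- edges) instead of A's single pass with a current-group accumulator; same O(n) cost, different decomposition.


-- ===== PORT A =====
-- one loop step of A: state = (grouped_boxes, current_group)
def gbbStepA (max_gap : Int) (st : List (List (Int × Int × Int × Int)) × List (Int × Int × Int × Int))
    (box : Int × Int × Int × Int) : List (List (Int × Int × Int × Int)) × List (Int × Int × Int × Int) :=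
  if st.2 = [] then (st.1, st.2 ++ [box])
  else
    match st.2.getLast? with          -- current_group[-1]; the list is nonempty here
    | none => (st.1, st.2)            -- unreachable (st.2 ≠ [])
    | some prev =>
      if |box.2.1 - prev.2.2.2| ≤ max_gap then (st.1, st.2 ++ [box])
      else (st.1 ++ [st.2], [box])

def group_bounding_boxes (boxes : List (Int × Int × Int × Int)) (max_gap : Int) : List (List (Int × Int × Int × Int)) :=
  let st := boxes.foldl (gbbStepA max_gap) ([], [])
  if st.2 = [] then st.1 else st.1 ++ [st.2]

-- ===== PORT B =====
-- abs(boxes[i][1] - boxes[i-1][3]) > max_gap; both indices are in range whenever B evaluates this,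
-- so the `none` fallback is unreachable (it only makes the comparison total)
def gbbGap (boxes : List (Int × Int × Int × Int)) (max_gap : Int) (i : Int) : Bool :=
  match PySem.List.pyGet? boxes i, PySem.List.pyGet? boxes (i - 1) with
  | some b, some p => decide (max_gap < |b.2.1 - p.2.2.2|)
  | _, _ => false

def group_bounding_boxes_alt (boxes : List (Int × Int × Int × Int)) (max_gap : Int) : List (List (Int × Int × Int × Int)) :=
  let n : Int := boxes.length
  if n = 0 then []
  else
    let edges := 0 :: ((PySem.List.pyRange 1 n 1).filter (gbbGap boxes max_gap) ++ [n])
    (edges.zip edges.tail).map (fun p => PySem.List.slice boxes (some p.1) (some p.2))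

-- ===== PRECONDITION & SPEC =====
def Spec_group_bounding_boxes (boxes : List (Int × Int × Int × Int)) (max_gap : Int) (out : List (List (Int × Int × Int × Int))) : Prop := out = group_bounding_boxes_alt boxes max_gap
instance (boxes : List (Int × Int × Int × Int)) (max_gap : Int) (out : List (List (Int × Int × Int × Int))) : Decidable (Spec_group_bounding_boxes boxes max_gap out) := by unfold Spec_group_bounding_boxes; infer_instance

-- ===== CLAIM (what is proved, stated in full; the proofs are below) =====
def Claim_equal_group_bounding_boxes : Prop := ∀ (boxes : List (Int × Int × Int × Int)) (max_gap : Int), Dom_group_bounding_boxes boxes max_gap → Spec_group_bounding_boxes boxes max_gap (group_bounding_boxes boxes max_gap)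

-- ===== LEMMAS AND PROOFS =====

-- reference recursion: prepend a box to an already-grouped tail
def gbbCons (max_gap : Int) (b : Int × Int × Int × Int)
    (rest : List (List (Int × Int × Int × Int))) : List (List (Int × Int × Int × Int)) :=
  match rest with
  | [] => [[b]]
  | grp :: grps =>
    match grp with
    | [] => [b] :: grp :: grps
    | x :: _ => if |x.2.1 - b.2.2.2| ≤ max_gap then (b :: grp) :: grps else [b] :: grp :: grps

def gbbRef (max_gap : Int) : List (Int × Int × Int × Int) → List (List (Int × Int × Int × Int))
  | [] => []
  | b :: rest => gbbCons max_gap b (gbbRef max_gap rest)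

-- merge a nonempty current group (with last element p) into the reference grouping of the tail
def gbbMerge (max_gap : Int) (c : List (Int × Int × Int × Int)) (p : Int × Int × Int × Int)
    (rest : List (List (Int × Int × Int × Int))) : List (List (Int × Int × Int × Int)) :=
  match rest with
  | [] => [c]
  | grp :: grps =>
    match grp with
    | [] => c :: grp :: grps
    | x :: _ => if |x.2.1 - p.2.2.2| ≤ max_gap then (c ++ grp) :: grps else c :: grp :: grps

theorem gbbCons_head (max_gap : Int) (b : Int × Int × Int × Int)
    (rest : List (List (Int × Int × Int × Int))) :
    ∃ u grps, gbbCons max_gap b rest = (b :: u) :: grps := by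
  unfold gbbCons
  rcases rest with _ | ⟨grp, grps⟩
  · exact ⟨[], [], rfl⟩
  · rcases grp with _ | ⟨x, t⟩
    · exact ⟨[], _ :: _, rfl⟩
    · by_cases h : |x.2.1 - b.2.2.2| ≤ max_gap
      · exact ⟨x :: t, grps, by simp [h]⟩
      · exact ⟨[], (x :: t) :: grps, by simp [h]⟩

theorem gbbMerge_single (max_gap : Int) (b : Int × Int × Int × Int)
    (rest : List (List (Int × Int × Int × Int))) :
    gbbMerge max_gap [b] b rest = gbbCons max_gap b rest := by
  unfold gbbMerge gbbCons
  rcases rest with _ | ⟨grp, grps⟩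
  · rfl
  · rcases grp with _ | ⟨x, t⟩
    · rfl
    · by_cases h : |x.2.1 - b.2.2.2| ≤ max_gap <;> simp [h]

-- A-side invariant
theorem gbbA_inv (max_gap : Int) (bs : List (Int × Int × Int × Int)) :
    ∀ (gacc : List (List (Int × Int × Int × Int))) (c : List (Int × Int × Int × Int))
      (p : Int × Int × Int × Int), c.getLast? = some p →
      (let st := bs.foldl (gbbStepA max_gap) (gacc, c)
       if st.2 = [] then st.1 else st.1 ++ [st.2]) =
      gacc ++ gbbMerge max_gap c p (gbbRef max_gap bs) := by
  induction bs with
  | nil =>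
    intro gacc c p hp
    have hc : c ≠ [] := by rintro rfl; simp at hp
    simp [gbbRef, gbbMerge, hc]
  | cons b rest ih =>
    intro gacc c p hp
    have hc : c ≠ [] := by rintro rfl; simp at hp
    simp only [List.foldl_cons]
    have hstep : gbbStepA max_gap (gacc, c) b =
        if |b.2.1 - p.2.2.2| ≤ max_gap then (gacc, c ++ [b]) else (gacc ++ [c], [b]) := by
      simp [gbbStepA, hc, hp]
    by_cases hchain : |b.2.1 - p.2.2.2| ≤ max_gap
    · rw [hstep, if_pos hchain]
      have hlast : (c ++ [b]).getLast? = some b := by simp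
      rw [ih gacc (c ++ [b]) b hlast]
      congr 1
      show gbbMerge max_gap (c ++ [b]) b (gbbRef max_gap rest) =
        gbbMerge max_gap c p (gbbRef max_gap (b :: rest))
      show gbbMerge max_gap (c ++ [b]) b (gbbRef max_gap rest) =
        gbbMerge max_gap c p (gbbCons max_gap b (gbbRef max_gap rest))
      rcases hR : gbbRef max_gap rest with _ | ⟨grp, grps⟩
      · simp [gbbMerge, gbbCons, hchain]
      · rcases grp with _ | ⟨x, t⟩
        · simp [gbbMerge, gbbCons, hchain]
        · by_cases h2 : |x.2.1 - b.2.2.2| ≤ max_gap <;>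
            simp [gbbMerge, gbbCons, hchain, h2]
    · rw [hstep, if_neg hchain]
      have hlast : ([b] : List (Int × Int × Int × Int)).getLast? = some b := rfl
      rw [ih (gacc ++ [c]) [b] b hlast, gbbMerge_single]
      obtain ⟨u, grps, hu⟩ := gbbCons_head max_gap b (gbbRef max_gap rest)
      show gacc ++ [c] ++ gbbCons max_gap b (gbbRef max_gap rest) =
        gacc ++ gbbMerge max_gap c p (gbbCons max_gap b (gbbRef max_gap rest))
      rw [hu]
      simp [gbbMerge, hchain]

theorem gbbA_eq_ref (boxes : List (Int × Int × Int × Int)) (max_gap : Int) :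
    group_bounding_boxes boxes max_gap = gbbRef max_gap boxes := by
  rcases boxes with _ | ⟨b, bs⟩
  · rfl
  · unfold group_bounding_boxes
    simp only [List.foldl_cons]
    have h1 : gbbStepA max_gap ([], []) b = ([], [b]) := by simp [gbbStepA]
    rw [h1]
    have := gbbA_inv max_gap bs [] [b] b rfl
    simp only [List.nil_append] at this
    rw [this, gbbMerge_single]
    rfl

-- ===== B side =====

-- the edge list of B minus the leading 0
def gbbEdges (boxes : List (Int × Int × Int × Int)) (max_gap : Int) : List Int :=
  (PySem.List.pyRange 1 (boxes.length : Int) 1).filter (gbbGap boxes max_gap) ++ [(boxes.length : Int)]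

-- slicing between successive edges
def gbbChop (boxes : List (Int × Int × Int × Int)) (E : List Int) : List (List (Int × Int × Int × Int)) :=
  ((0 :: E).zip E).map (fun p => PySem.List.slice boxes (some p.1) (some p.2))

theorem gbbAlt_eq_chop (boxes : List (Int × Int × Int × Int)) (max_gap : Int) (h : boxes ≠ []) :
    group_bounding_boxes_alt boxes max_gap = gbbChop boxes (gbbEdges boxes max_gap) := by
  unfold group_bounding_boxes_alt gbbChop gbbEdges
  simp [h]

theorem gbbEdges_pos (boxes : List (Int × Int × Int × Int)) (max_gap : Int) (h : boxes ≠ []) :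
    ∀ e ∈ gbbEdges boxes max_gap, 1 ≤ e := by
  intro e he
  unfold gbbEdges at he
  rcases List.mem_append.mp he with h1 | h2
  · have := List.mem_of_mem_filter h1
    exact ((PySem.List.mem_pyRange_one).mp this).1
  · have : e = (boxes.length : Int) := by simpa using h2
    subst this
    have : boxes.length ≠ 0 := fun hc => h (List.length_eq_zero_iff.mp hc)
    omega

theorem slice_cons_succ (b : Int × Int × Int × Int) (rest : List (Int × Int × Int × Int))
    (a c : Int) (ha : 0 ≤ a) (hc : 0 ≤ c) :
    PySem.List.slice (b :: rest) (some (a + 1)) (some (c + 1)) =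
      PySem.List.slice rest (some a) (some c) := by
  obtain ⟨j, rfl⟩ := Int.eq_ofNat_of_zero_le ha
  obtain ⟨k, rfl⟩ := Int.eq_ofNat_of_zero_le hc
  have h1 : ((j : Int) + 1) = ((j + 1 : ℕ) : Int) := by push_cast; ring
  have h2 : ((k : Int) + 1) = ((k + 1 : ℕ) : Int) := by push_cast; ring
  rw [h1, h2, PySem.List.slice_natCast, PySem.List.slice_natCast]
  simp [List.drop_succ_cons, Nat.succ_sub_succ]

theorem slice_cons_zero (b : Int × Int × Int × Int) (rest : List (Int × Int × Int × Int))
    (c : Int) (hc : 0 ≤ c) :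
    PySem.List.slice (b :: rest) (some 0) (some (c + 1)) =
      b :: PySem.List.slice rest (some 0) (some c) := by
  obtain ⟨k, rfl⟩ := Int.eq_ofNat_of_zero_le hc
  have h2 : ((k : Int) + 1) = ((k + 1 : ℕ) : Int) := by push_cast; ring
  have h0 : (0 : Int) = ((0 : ℕ) : Int) := rfl
  rw [h2, h0, PySem.List.slice_natCast, PySem.List.slice_natCast]
  simp

theorem pyRange_shift (a b : Int) :
    PySem.List.pyRange (a + 1) (b + 1) 1 = (PySem.List.pyRange a b 1).map (· + 1) := by
  rw [PySem.List.pyRange_one, PySem.List.pyRange_one]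
  have h : (b + 1 - (a + 1)).toNat = (b - a).toNat := by omega
  rw [h, List.map_map]
  exact List.map_congr_left (fun k _ => by simp; ring)

-- shift of the gap predicate: positions ≥ 2 in b :: rest look at rest at position i-1
theorem gbbGap_cons_shift (b : Int × Int × Int × Int) (rest : List (Int × Int × Int × Int))
    (max_gap : Int) (i : Int) (hi : 1 ≤ i) :
    gbbGap (b :: rest) max_gap (i + 1) = gbbGap rest max_gap i := by
  obtain ⟨k, rfl⟩ := Int.eq_ofNat_of_zero_le (by omega : (0:Int) ≤ i)
  have hk : 1 ≤ k := by exact_mod_cast hi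
  obtain ⟨m, rfl⟩ := Nat.exists_eq_add_of_le hk
  unfold gbbGap
  have e1 : ((1 + m : ℕ) : Int) + 1 = ((m + 2 : ℕ) : Int) := by push_cast; ring
  have e2 : ((m + 2 : ℕ) : Int) - 1 = ((m + 1 : ℕ) : Int) := by push_cast; ring
  have e3 : ((1 + m : ℕ) : Int) = ((m + 1 : ℕ) : Int) := by push_cast; ring
  have e4 : ((m + 1 : ℕ) : Int) - 1 = ((m : ℕ) : Int) := by push_cast; ring
  rw [e1, e3, e2, e4, PySem.List.pyGet?_natCast, PySem.List.pyGet?_natCast,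
    PySem.List.pyGet?_natCast, PySem.List.pyGet?_natCast]
  simp

-- the edge list of b :: rest, rest nonempty: optional break at 1, then the shifted edges of rest
theorem gbbEdges_cons (b : Int × Int × Int × Int) (rest : List (Int × Int × Int × Int))
    (max_gap : Int) (h : rest ≠ []) :
    gbbEdges (b :: rest) max_gap =
      (if gbbGap (b :: rest) max_gap 1 then [(1 : Int)] else []) ++
        (gbbEdges rest max_gap).map (· + 1) := by
  unfold gbbEdges
  have hlen : 1 ≤ rest.length := List.length_pos_iff.mpr h
  have hcons : PySem.List.pyRange 1 ((b :: rest).length : Int) 1 =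
      1 :: PySem.List.pyRange 2 ((b :: rest).length : Int) 1 := by
    apply PySem.List.pyRange_one_cons
    simp; omega
  have hshift : PySem.List.pyRange 2 ((b :: rest).length : Int) 1 =
      (PySem.List.pyRange 1 (rest.length : Int) 1).map (· + 1) := by
    have : ((b :: rest).length : Int) = (rest.length : Int) + 1 := by simp
    rw [this, show (2 : Int) = 1 + 1 from rfl, pyRange_shift]
  rw [hcons, hshift, List.filter_cons, List.filter_map]
  have hfil : (PySem.List.pyRange 1 (rest.length : Int) 1).filter
        ((gbbGap (b :: rest) max_gap) ∘ (· + 1)) =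
      (PySem.List.pyRange 1 (rest.length : Int) 1).filter (gbbGap rest max_gap) := by
    apply List.filter_congr
    intro i hi
    have h1 : 1 ≤ i := ((PySem.List.mem_pyRange_one).mp hi).1
    simp only [Function.comp]
    exact gbbGap_cons_shift b rest max_gap i h1
  rw [hfil]
  have hlast : ((b :: rest).length : Int) = (rest.length : Int) + 1 := by simp
  by_cases hb : gbbGap (b :: rest) max_gap 1 <;> simp [hb]

-- head condition of B against the head of rest
theorem gbbGap_one (b x : Int × Int × Int × Int) (xs : List (Int × Int × Int × Int)) (max_gap : Int) :
    gbbGap (b :: x :: xs) max_gap 1 = decide (max_gap < |x.2.1 - b.2.2.2|) := by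
  have h0 : (0:Int) ≤ (xs.length:Int) + 1 := by omega
  simp [gbbGap, PySem.List.pyGet?, PySem.List.pyIdx?, h0]

-- chopping with shifted edges
theorem gbbChop_shift (b : Int × Int × Int × Int) (rest : List (Int × Int × Int × Int))
    (E : List Int) (hE : ∀ e ∈ E, 1 ≤ e) :
    ((0 :: E).zip E).map
        (fun p => PySem.List.slice (b :: rest) (some (p.1 + 1)) (some (p.2 + 1))) =
      gbbChop rest E := by
  unfold gbbChop
  apply List.map_congr_left
  intro p hp
  obtain ⟨hp1, hp2⟩ := List.of_mem_zip hp
  have h1 : 0 ≤ p.1 := by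
    rcases List.mem_cons.mp hp1 with h | h
    · omega
    · have := hE _ h; omega
  have h2 : 0 ≤ p.2 := by have := hE _ hp2; omega
  exact slice_cons_succ b rest p.1 p.2 h1 h2

-- main B-side lemma: chopping at the break edges computes the reference grouping
theorem gbbB_eq_ref (max_gap : Int) : ∀ (boxes : List (Int × Int × Int × Int)),
    group_bounding_boxes_alt boxes max_gap = gbbRef max_gap boxes := by
  intro boxes
  induction boxes with
  | nil => rfl
  | cons b rest ih =>
    have hne : (b :: rest) ≠ [] := by simp
    rw [gbbAlt_eq_chop _ _ hne]
    rcases hrest : rest with _ | ⟨x, xs⟩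
    · -- single box
      show gbbChop [b] (gbbEdges [b] max_gap) = gbbRef max_gap [b]
      have : gbbEdges [b] max_gap = [(1 : Int)] := by
        unfold gbbEdges
        rw [show (([b] : List (Int × Int × Int × Int)).length : Int) = 1 by simp,
          PySem.List.pyRange_one_eq_nil (by omega)]
        rfl
      rw [this]
      show [PySem.List.slice [b] (some 0) (some 1)] = gbbRef max_gap [b]
      have h01 : PySem.List.slice [b] (some ((0:ℕ):Int)) (some ((1:ℕ):Int)) = [b] := by
        rw [PySem.List.slice_natCast]; rfl
      rw [show (0:Int) = ((0:ℕ):Int) from rfl, show (1:Int) = ((1:ℕ):Int) from rfl, h01]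
      rfl
    · -- rest = x :: xs nonempty
      subst hrest
      have hrne : (x :: xs) ≠ [] := by simp
      have hEpos := gbbEdges_pos (x :: xs) max_gap hrne
      have hEne : gbbEdges (x :: xs) max_gap ≠ [] := by
        unfold gbbEdges; simp
      rw [gbbEdges_cons b (x :: xs) max_gap hrne]
      rw [gbbGap_one]
      have hchop : gbbChop (x :: xs) (gbbEdges (x :: xs) max_gap) = gbbRef max_gap (x :: xs) := by
        rw [← gbbAlt_eq_chop _ _ hrne]; exact ih
      obtain ⟨u, grps, hu⟩ := gbbCons_head max_gap x (gbbRef max_gap xs)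
      have hRef : gbbRef max_gap (x :: xs) = (x :: u) :: grps := hu
      by_cases hb : max_gap < |x.2.1 - b.2.2.2|
      · -- break after b : new group [b]
        rw [if_pos (by simpa using hb)]
        rcases hE : gbbEdges (x :: xs) max_gap with _ | ⟨e, E⟩
        · exact absurd hE hEne
        · unfold gbbChop
          show (((0 : Int) :: 1 :: (e + 1) :: E.map (· + 1)).zip
              (1 :: (e + 1) :: E.map (· + 1))).map
              (fun p => PySem.List.slice (b :: x :: xs) (some p.1) (some p.2)) =
            gbbRef max_gap (b :: x :: xs)
          rw [List.zip_cons_cons]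
          have hz : ((1 : Int) :: (e + 1) :: E.map (· + 1)).zip ((e + 1) :: E.map (· + 1)) =
              (((0 : Int) :: e :: E).zip (e :: E)).map (fun p => (p.1 + 1, p.2 + 1)) := by
            have : ((1 : Int) :: (e + 1) :: E.map (· + 1)) = ((0 : Int) :: e :: E).map (· + 1) := by
              simp
            rw [this, show ((e + 1) :: E.map (· + 1)) = (e :: E).map (· + 1) by simp,
              List.zip_map]
            rfl
          rw [List.map_cons, hz, List.map_map]
          have hsl01 : PySem.List.slice (b :: x :: xs) (some ((0:ℕ):Int)) (some ((1:ℕ):Int)) = [b] := by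
            rw [PySem.List.slice_natCast]; rfl
          have hmap : (((0 : Int) :: e :: E).zip (e :: E)).map
              ((fun p => PySem.List.slice (b :: x :: xs) (some p.1) (some p.2)) ∘
                (fun p => (p.1 + 1, p.2 + 1))) =
              gbbChop (x :: xs) (e :: E) := by
            rw [← gbbChop_shift b (x :: xs) (e :: E) (by rw [← hE]; exact hEpos)]
            rfl
          have hsl01' : PySem.List.slice (b :: x :: xs) (some 0) (some 1) = [b] := hsl01
          rw [hmap, ← hE, hchop,
            show gbbRef max_gap (b :: x :: xs) = gbbCons max_gap b (gbbRef max_gap (x :: xs)) from rfl,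
            hRef]
          simp [gbbCons, not_le.mpr hb, hsl01']
      · -- no break: b joins the first group
        rw [if_neg (by simpa using hb)]
        rcases hE : gbbEdges (x :: xs) max_gap with _ | ⟨e, E⟩
        · exact absurd hE hEne
        · have he1 : 1 ≤ e := hEpos e (by rw [hE]; simp)
          unfold gbbChop
          show (((0 : Int) :: (e + 1) :: E.map (· + 1)).zip ((e + 1) :: E.map (· + 1))).map
              (fun p => PySem.List.slice (b :: x :: xs) (some p.1) (some p.2)) =
            gbbRef max_gap (b :: x :: xs)
          rw [List.zip_cons_cons, List.map_cons]
          have hz : ((e + 1) :: E.map (· + 1)).zip (E.map (· + 1)) =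
              ((e :: E).zip E).map (fun p => (p.1 + 1, p.2 + 1)) := by
            rw [show ((e + 1) :: E.map (· + 1)) = (e :: E).map (· + 1) by simp, List.zip_map]
            rfl
          rw [hz, List.map_map]
          have hEpos' : ∀ y ∈ E, 1 ≤ y := fun y hy => hEpos y (by rw [hE]; simp [hy])
          have hmap : (((e : Int) :: E).zip E).map
              ((fun p => PySem.List.slice (b :: x :: xs) (some p.1) (some p.2)) ∘
                (fun p => (p.1 + 1, p.2 + 1))) =
              ((e :: E).zip E).map
                (fun p => PySem.List.slice (x :: xs) (some p.1) (some p.2)) := by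
            apply List.map_congr_left
            intro p hp
            obtain ⟨hp1, hp2⟩ := List.of_mem_zip hp
            have h1 : 0 ≤ p.1 := by
              rcases List.mem_cons.mp hp1 with h | h
              · omega
              · have := hEpos' _ h; omega
            have h2 : 0 ≤ p.2 := by have := hEpos' _ hp2; omega
            exact slice_cons_succ b (x :: xs) p.1 p.2 h1 h2
          rw [hmap]
          -- relate to the chop of rest
          have hchop' : gbbChop (x :: xs) (e :: E) = (x :: u) :: grps := by
            rw [← hE, hchop, hRef]
          unfold gbbChop at hchop'
          rw [List.zip_cons_cons, List.map_cons] at hchop'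
          obtain ⟨hh, ht⟩ := List.cons_eq_cons.mp hchop'
          have hhead : PySem.List.slice (x :: xs) (some 0) (some e) = x :: u := hh
          have htail : ((e :: E).zip E).map
              (fun p => PySem.List.slice (x :: xs) (some p.1) (some p.2)) = grps := ht
          rw [htail]
          show PySem.List.slice (b :: x :: xs) (some 0) (some (e + 1)) :: grps =
            gbbRef max_gap (b :: x :: xs)
          have hsl : PySem.List.slice (b :: x :: xs) (some 0) (some (e + 1)) =
              b :: PySem.List.slice (x :: xs) (some 0) (some e) :=
            slice_cons_zero b (x :: xs) e (by omega)
          rw [hsl, hhead,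
            show gbbRef max_gap (b :: x :: xs) = gbbCons max_gap b (gbbRef max_gap (x :: xs)) from rfl,
            hRef]
          simp [gbbCons, not_lt.mp hb]

-- ===== VERDICT (by name: the statement is the Claim_ definition above) =====
theorem group_bounding_boxes_spec : Claim_equal_group_bounding_boxes := by
  intro boxes max_gap _
  show group_bounding_boxes boxes max_gap = group_bounding_boxes_alt boxes max_gap
  rw [gbbA_eq_ref, gbbB_eq_ref]
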